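-- pv_equiv track=rewrite | github.com/alhart2015/FantasyBaseball | scripts/derive_sgp_denominators.py | _serpentine_deal
-- ===== SOURCE A (Python) =====
-- def _serpentine_deal(players, num_teams: int, picks_per_team: int):
--     teams: list[list] = [[] for _ in range(num_teams)]
--     for pick_num in range(num_teams * picks_per_team):
--         rnd = pick_num // num_teams
--         pos = pick_num % num_teams
--         team_idx = pos if rnd % 2 == 0 else (num_teams - 1 - pos)
--         teams[team_idx].append(players[pick_num])
--     return teams
-- ===== SOURCE B (Python) =====
-- def _serpentine_deal(players, num_teams: int, picks_per_team: int):
--     teams: list[list] = [[] for _ in range(num_teams)]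
--     if num_teams <= 0:
--         return teams
--     for rnd in range(picks_per_team):
--         base = rnd * num_teams
--         round_picks = [players[base + pos] for pos in range(num_teams)]
--         if rnd % 2 == 1:
--             round_picks.reverse()
--         for team, pick in zip(teams, round_picks):
--             team.append(pick)
--     return teams
-- ===== Notes on version B (the rewrite author's own statement) =====
-- stated objective: alternative
-- what changed: Replaced A's single flat loop over all picks with per-pick divmod arithmetic by an explicit round-by-round deal that builds each round's picks as a list, reverses it on odd rounds, and zips it onto the teams.
import Mathlib
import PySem

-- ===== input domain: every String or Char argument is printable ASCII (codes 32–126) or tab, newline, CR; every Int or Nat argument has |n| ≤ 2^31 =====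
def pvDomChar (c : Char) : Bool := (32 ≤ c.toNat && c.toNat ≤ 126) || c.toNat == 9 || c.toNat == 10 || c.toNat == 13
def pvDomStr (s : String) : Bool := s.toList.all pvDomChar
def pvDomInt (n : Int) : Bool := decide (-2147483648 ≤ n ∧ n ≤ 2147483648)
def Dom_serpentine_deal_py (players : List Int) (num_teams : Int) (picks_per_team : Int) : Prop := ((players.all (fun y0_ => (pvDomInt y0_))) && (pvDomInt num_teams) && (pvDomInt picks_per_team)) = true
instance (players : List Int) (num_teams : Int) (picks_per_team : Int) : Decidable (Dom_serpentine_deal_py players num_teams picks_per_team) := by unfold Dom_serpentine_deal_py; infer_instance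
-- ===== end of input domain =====

-- B replaces A's single flat loop (divmod arithmetic per pick) with an explicit round-by-round
-- deal that builds each round's picks and reverses them on odd rounds; objective: alternative.

-- ===== PORT A =====
-- teams[team_idx].append(x); out-of-range index only occurs outside Pre_ (Python raises there)
def pvPushA (teams : List (List Int)) (i : Int) (x : Int) : List (List Int) :=
  teams.set i.toNat (teams.getD i.toNat [] ++ [x])

def serpentine_deal_py (players : List Int) (num_teams : Int) (picks_per_team : Int) : List (List Int) :=
  (PySem.List.pyRange 0 (num_teams * picks_per_team) 1).foldl
    (fun teams pick_num =>
      let rnd := PySem.Int.floordiv pick_num num_teams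
      let pos := PySem.Int.mod pick_num num_teams
      let team_idx := if PySem.Int.mod rnd 2 = 0 then pos else num_teams - 1 - pos
      pvPushA teams team_idx (PySem.List.pyGetD players pick_num 0))
    ((PySem.List.pyRange 0 num_teams 1).map (fun _ => ([] : List Int)))

-- ===== PORT B =====
-- 'for team, pick in zip(teams, round_picks): team.append(pick)'
def pvZipAppend : List (List Int) → List Int → List (List Int)
  | t :: ts, p :: ps => (t ++ [p]) :: pvZipAppend ts ps
  | ts, [] => ts
  | [], _ :: _ => []

def serpentine_deal_py_alt (players : List Int) (num_teams : Int) (picks_per_team : Int) : List (List Int) :=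
  if num_teams ≤ 0 then (PySem.List.pyRange 0 num_teams 1).map (fun _ => ([] : List Int)) else
  (PySem.List.pyRange 0 picks_per_team 1).foldl
    (fun teams rnd =>
      let base := rnd * num_teams
      let roundPicks := (PySem.List.pyRange 0 num_teams 1).map
        (fun pos => PySem.List.pyGetD players (base + pos) 0)
      let roundPicks := if PySem.Int.mod rnd 2 = 1 then roundPicks.reverse else roundPicks
      pvZipAppend teams roundPicks)
    ((PySem.List.pyRange 0 num_teams 1).map (fun _ => ([] : List Int)))

-- ===== PRECONDITION & SPEC =====
-- Pre_ is exactly the set of inputs on which Python A returns: when num_teams*picks_per_team > 0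
-- the loop needs num_teams > 0 (else teams is empty: IndexError) and enough players (else IndexError).
def Pre_serpentine_deal_py (players : List Int) (num_teams : Int) (picks_per_team : Int) : Prop :=
  num_teams * picks_per_team ≤ 0 ∨
    (0 < num_teams ∧ num_teams * picks_per_team ≤ (players.length : Int))

instance (players : List Int) (num_teams : Int) (picks_per_team : Int) : Decidable (Pre_serpentine_deal_py players num_teams picks_per_team) := by unfold Pre_serpentine_deal_py; infer_instance

def pvWitness_serpentine_deal_py : List Int × Int × Int := ([7, 1, 5, 2, 9, 4], 2, 3)

def Spec_serpentine_deal_py (players : List Int) (num_teams : Int) (picks_per_team : Int) (out : List (List Int)) : Prop := out = serpentine_deal_py_alt players num_teams picks_per_team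
instance (players : List Int) (num_teams : Int) (picks_per_team : Int) (out : List (List Int)) : Decidable (Spec_serpentine_deal_py players num_teams picks_per_team out) := by unfold Spec_serpentine_deal_py; infer_instance

-- ===== CLAIM (what is proved, stated in full; the proofs are below) =====
def Claim_equal_serpentine_deal_py : Prop := ∀ (players : List Int) (num_teams : Int) (picks_per_team : Int), Dom_serpentine_deal_py players num_teams picks_per_team → Pre_serpentine_deal_py players num_teams picks_per_team → Spec_serpentine_deal_py players num_teams picks_per_team (serpentine_deal_py players num_teams picks_per_team)

-- ===== LEMMAS AND PROOFS =====

theorem pvPushA_length (t : List (List Int)) (i : Int) (x : Int) :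
    (pvPushA t i x).length = t.length := by
  simp [pvPushA]

theorem pvPushA_getElem (t : List (List Int)) (i : Int) (x : Int) (j : Nat) (hj : j < t.length) :
    (pvPushA t i x)[j]'(by simpa [pvPushA_length] using hj) =
      if i.toNat = j then t[j] ++ [x] else t[j] := by
  unfold pvPushA
  by_cases h : i.toNat = j
  · subst h
    simp [List.getD_eq_getElem?_getD, List.getElem?_eq_getElem hj]
  · simp [List.getElem_set, fun hc : i.toNat = j => h hc]

theorem pvZipAppend_length (ts : List (List Int)) (ps : List Int) :
    (pvZipAppend ts ps).length = ts.length := by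
  induction ts generalizing ps with
  | nil => cases ps <;> simp [pvZipAppend]
  | cons t ts ih => cases ps <;> simp [pvZipAppend, ih]

theorem pvZipAppend_getElem (ts : List (List Int)) (ps : List Int) (j : Nat)
    (hj : j < ts.length) (hp : j < ps.length) :
    (pvZipAppend ts ps)[j]'(by simpa [pvZipAppend_length] using hj) =
      ts[j] ++ [ps[j]] := by
  induction ts generalizing ps j with
  | nil => simp at hj
  | cons t ts ih =>
      cases ps with
      | nil => simp at hp
      | cons p ps =>
          cases j with
          | zero => simp [pvZipAppend]
          | succ j => simpa [pvZipAppend] using ih ps j (by simpa using hj) (by simpa using hp)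

-- fold of pvPushA over a list of picks, characterised elementwise via a filter
theorem pushFold_length (idx : Int → Int) (val : Int → Int) (L : List Int)
    (teams : List (List Int)) :
    (L.foldl (fun t p => pvPushA t (idx p) (val p)) teams).length = teams.length := by
  induction L generalizing teams with
  | nil => rfl
  | cons p L ih => simp [List.foldl_cons, ih, pvPushA_length]

theorem pushFold_getElem (idx : Int → Int) (val : Int → Int) (L : List Int)
    (teams : List (List Int)) (j : Nat) (hj : j < teams.length) :
    (L.foldl (fun t p => pvPushA t (idx p) (val p)) teams)[j]'(by
        simpa [pushFold_length] using hj) =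
      teams[j] ++ ((L.filter (fun p => (idx p).toNat == j)).map val) := by
  induction L generalizing teams with
  | nil => simp
  | cons p L ih =>
      have hj' : j < (pvPushA teams (idx p) (val p)).length := by
        simpa [pvPushA_length] using hj
      have h2 := ih (pvPushA teams (idx p) (val p)) hj'
      simp only [List.foldl_cons]
      rw [h2, pvPushA_getElem teams (idx p) (val p) j hj]
      by_cases h : (idx p).toNat = j
      · simp [List.filter_cons, h]
      · simp [List.filter_cons, h]

theorem filter_range_eq (n j : Nat) (hj : j < n) :
    (List.range n).filter (fun q => q == j) = [j] := by
  induction n with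
  | zero => omega
  | succ n ih =>
      rw [List.range_succ, List.filter_append]
      by_cases h : j < n
      · have : n ≠ j := by omega
        simp [ih h, this]
      · have hnj : n = j := by omega
        subst hnj
        have : ∀ q ∈ List.range n, ¬ (q == n) = true := by
          intro q hq
          simp at hq ⊢; omega
        simp [List.filter_eq_nil_iff.mpr this]

-- length of either fold's state is always the initial length (for B's side)
theorem bfold_length (f : List (List Int) → Int → List Int) (L : List Int)
    (teams : List (List Int)) :
    (L.foldl (fun t r => pvZipAppend t (f t r)) teams).length = teams.length := by
  induction L generalizing teams with
  | nil => rfl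
  | cons r L ih => simp [List.foldl_cons, ih, pvZipAppend_length]

-- one round of A equals one round of B, for a state of length n  (n > 0)
theorem pvRound_eq (players : List Int) (n r : Nat) (hn : 0 < n)
    (teams : List (List Int)) (hlen : teams.length = n) :
    (PySem.List.pyRange ((r : Int) * n) ((r : Int) * n + n) 1).foldl
      (fun t pick_num =>
        let rnd := PySem.Int.floordiv pick_num (n : Int)
        let pos := PySem.Int.mod pick_num (n : Int)
        let team_idx := if PySem.Int.mod rnd 2 = 0 then pos else (n : Int) - 1 - pos
        pvPushA t team_idx (PySem.List.pyGetD players pick_num 0)) teams =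
    (fun t =>
      let base := (r : Int) * n
      let roundPicks := (PySem.List.pyRange 0 (n : Int) 1).map
        (fun pos => PySem.List.pyGetD players (base + pos) 0)
      let roundPicks := if PySem.Int.mod (r : Int) 2 = 1 then roundPicks.reverse else roundPicks
      pvZipAppend t roundPicks) teams := by
  have hnI : (0 : Int) < (n : Int) := by exact_mod_cast hn
  -- name the index and value functions of A's step
  set idx : Int → Int := fun p =>
    if PySem.Int.mod (PySem.Int.floordiv p (n : Int)) 2 = 0 then PySem.Int.mod p (n : Int)
    else (n : Int) - 1 - PySem.Int.mod p (n : Int) with hidx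
  set val : Int → Int := fun p => PySem.List.pyGetD players p 0 with hval
  set a : Int := (r : Int) * n with ha
  set picks : List Int := (PySem.List.pyRange 0 (n : Int) 1).map
    (fun pos => PySem.List.pyGetD players (a + pos) 0) with hpicks
  show (PySem.List.pyRange a (a + n) 1).foldl (fun t p => pvPushA t (idx p) (val p)) teams =
    pvZipAppend teams (if PySem.Int.mod (r : Int) 2 = 1 then picks.reverse else picks)
  -- the pick range of round r, as a mapped Nat range
  have hL : PySem.List.pyRange a (a + n) 1 = (List.range n).map (fun q : Nat => a + (q : Int)) := by
    have hto : (a + (n : Int) - a).toNat = n := by omega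
    rw [PySem.List.pyRange_one, hto]
  -- arithmetic facts for picks inside the round
  have hdiv : ∀ q : Nat, q < n → PySem.Int.floordiv (a + (q : Int)) (n : Int) = (r : Int) := by
    intro q hq
    rw [PySem.Int.floordiv_eq_iff_of_pos hnI]
    have hqI : (q : Int) < (n : Int) := by exact_mod_cast hq
    constructor
    · have : (0 : Int) ≤ (q : Int) := Int.natCast_nonneg q
      omega
    · have : ((r : Int) + 1) * n = a + n := by rw [ha]; ring
      omega
  have hmod : ∀ q : Nat, q < n → PySem.Int.mod (a + (q : Int)) (n : Int) = (q : Int) := by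
    intro q hq
    have h := PySem.Int.floordiv_mul_add_mod (a + (q : Int)) (n : Int)
    rw [hdiv q hq] at h
    omega
  have hmod2 : PySem.Int.mod (r : Int) 2 = ((r % 2 : Nat) : Int) := by
    rw [PySem.Int.mod_eq_emod_of_pos (by norm_num : (0:Int) < 2)]
    omega
  -- idx at a pick of this round
  have hidxq : ∀ q : Nat, q < n →
      idx (a + (q : Int)) = if r % 2 = 0 then (q : Int) else (n : Int) - 1 - (q : Int) := by
    intro q hq
    rw [hidx]
    simp only [hdiv q hq, hmod q hq, hmod2]
    by_cases hpar : r % 2 = 0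
    · simp [hpar]
    · have h1 : r % 2 = 1 := by omega
      simp [h1]
  have hvalq : ∀ q : Nat, val (a + (q : Int)) = PySem.List.pyGetD players (a + (q : Int)) 0 := by
    intro q; rfl
  -- lengths
  have hpicklen : picks.length = n := by
    rw [hpicks]
    simp [PySem.List.length_pyRange_one]
  have hrplen : (if PySem.Int.mod (r : Int) 2 = 1 then picks.reverse else picks).length = n := by
    split <;> simp [hpicklen]
  -- elements of picks
  have hpickget : ∀ j : Nat, j < n →
      picks[j]? = some (PySem.List.pyGetD players (a + (j : Int)) 0) := by
    intro j hj
    rw [hpicks]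
    have h := PySem.List.getElem?_map_pyRange_zero
      (fun pos => PySem.List.pyGetD players (a + pos) 0) n j hj
    simpa using h
  have hpickgetE : ∀ (j : Nat) (hj : j < n),
      picks[j]'(by omega) = PySem.List.pyGetD players (a + (j : Int)) 0 := by
    intro j hj
    have h := hpickget j hj
    rw [List.getElem?_eq_getElem (by omega : j < picks.length)] at h
    exact Option.some.inj h
  apply List.ext_getElem
  · rw [pushFold_length, pvZipAppend_length]
  · intro j hj1 hj2
    have hjn : j < n := by rw [pushFold_length, hlen] at hj1; exact hj1
    have hjt : j < teams.length := by omega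
    rw [pushFold_getElem idx val _ teams j hjt,
        pvZipAppend_getElem teams _ j hjt (by omega)]
    congr 1
    -- compute the filter
    rw [hL, List.filter_map]
    by_cases hpar : r % 2 = 0
    · have hcong : ∀ q ∈ List.range n,
          ((fun p => (idx p).toNat == j) ∘ (fun q : Nat => a + (q : Int))) q = (q == j) := by
        intro q hq
        rw [List.mem_range] at hq
        simp only [Function.comp_apply, hidxq q hq, if_pos hpar]
        simp
      rw [List.filter_congr hcong, filter_range_eq n j hjn]
      have hmodne : ¬ PySem.Int.mod (r : Int) 2 = 1 := by rw [hmod2]; omega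
      simp only [if_neg hmodne]
      rw [hpickgetE j hjn]
      simp [hval]
    · have hpar1 : r % 2 = 1 := by omega
      have hcong : ∀ q ∈ List.range n,
          ((fun p => (idx p).toNat == j) ∘ fun q : Nat => a + (q : Int)) q = (q == n - 1 - j) := by
        intro q hq
        rw [List.mem_range] at hq
        simp only [Function.comp_apply, hidxq q hq, if_neg (by omega : ¬ r % 2 = 0)]
        have hqI : (q : Int) < (n : Int) := by exact_mod_cast hq
        have : ((n : Int) - 1 - (q : Int)).toNat = n - 1 - q := by omega
        rw [this]
        rw [Bool.eq_iff_iff]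
        simp only [beq_iff_eq]
        omega
      rw [List.filter_congr hcong, filter_range_eq n (n - 1 - j) (by omega)]
      have hmodeq : PySem.Int.mod (r : Int) 2 = 1 := by rw [hmod2]; simp [hpar1]
      simp only [if_pos hmodeq]
      have hrev : picks.reverse[j]'(by simp [hpicklen]; omega) = picks[n - 1 - j]'(by omega) := by
        rw [List.getElem_reverse]
        congr 1
        omega
      rw [hrev, hpickgetE (n - 1 - j) (by omega)]
      simp [hval]

-- A's fold over the first n*k picks equals B's fold over the first k rounds
theorem pvFolds_eq (players : List Int) (n k : Nat) (hn : 0 < n)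
    (teams : List (List Int)) (hlen : teams.length = n) :
    (PySem.List.pyRange 0 ((n : Int) * (k : Int)) 1).foldl
      (fun t pick_num =>
        let rnd := PySem.Int.floordiv pick_num (n : Int)
        let pos := PySem.Int.mod pick_num (n : Int)
        let team_idx := if PySem.Int.mod rnd 2 = 0 then pos else (n : Int) - 1 - pos
        pvPushA t team_idx (PySem.List.pyGetD players pick_num 0)) teams =
    (PySem.List.pyRange 0 (k : Int) 1).foldl
      (fun t rnd =>
        let base := rnd * (n : Int)
        let roundPicks := (PySem.List.pyRange 0 (n : Int) 1).map
          (fun pos => PySem.List.pyGetD players (base + pos) 0)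
        let roundPicks := if PySem.Int.mod rnd 2 = 1 then roundPicks.reverse else roundPicks
        pvZipAppend t roundPicks) teams := by
  induction k with
  | zero =>
      rw [show ((n : Int) * ((0 : Nat) : Int)) = 0 by simp]
      rw [show (((0 : Nat) : Int)) = 0 by simp]
      rw [PySem.List.pyRange_one_eq_nil (le_refl 0)]
      simp
  | succ k ih =>
      have hnI : (0 : Int) ≤ (n : Int) := Int.natCast_nonneg n
      have hkI : (0 : Int) ≤ (k : Int) := Int.natCast_nonneg k
      -- split A's range at n*k
      have hsplit : PySem.List.pyRange 0 ((n : Int) * ((k + 1 : Nat) : Int)) 1 =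
          PySem.List.pyRange 0 ((n : Int) * (k : Int)) 1 ++
          PySem.List.pyRange ((k : Int) * (n : Int)) ((k : Int) * (n : Int) + (n : Int)) 1 := by
        have h1 : ((n : Int) * ((k + 1 : Nat) : Int)) = (k : Int) * (n : Int) + (n : Int) := by
          push_cast; ring
        rw [h1]
        have h2 : (n : Int) * (k : Int) = (k : Int) * (n : Int) := by ring
        rw [h2]
        exact PySem.List.pyRange_one_append 0 ((k : Int) * (n : Int))
          ((k : Int) * (n : Int) + (n : Int)) (Int.mul_nonneg hkI hnI) (by omega)
      -- split B's range at k
      have hsplitB : PySem.List.pyRange 0 (((k + 1 : Nat)) : Int) 1 =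
          PySem.List.pyRange 0 (k : Int) 1 ++ [(k : Int)] := by
        have h1 : (((k + 1 : Nat)) : Int) = (k : Int) + 1 := by push_cast; ring
        rw [h1]
        exact PySem.List.pyRange_one_succ_right hkI
      rw [hsplit, hsplitB, List.foldl_append, List.foldl_append, ih]
      simp only [List.foldl_cons, List.foldl_nil]
      -- the state after k rounds of B has length n
      have hstate : ((PySem.List.pyRange 0 (k : Int) 1).foldl
          (fun t rnd =>
            let base := rnd * (n : Int)
            let roundPicks := (PySem.List.pyRange 0 (n : Int) 1).map
              (fun pos => PySem.List.pyGetD players (base + pos) 0)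
            let roundPicks := if PySem.Int.mod rnd 2 = 1 then roundPicks.reverse else roundPicks
            pvZipAppend t roundPicks) teams).length = n := by
        rw [bfold_length (fun t rnd =>
          if PySem.Int.mod rnd 2 = 1 then
            ((PySem.List.pyRange 0 (n : Int) 1).map
              (fun pos => PySem.List.pyGetD players (rnd * (n : Int) + pos) 0)).reverse
          else (PySem.List.pyRange 0 (n : Int) 1).map
              (fun pos => PySem.List.pyGetD players (rnd * (n : Int) + pos) 0))]
        exact hlen
      exact pvRound_eq players n k hn _ hstate

-- ===== VERDICT (by name: the statement is the Claim_ definition above) =====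
theorem serpentine_deal_py_spec : Claim_equal_serpentine_deal_py := by
  intro players nt ppt hdom hpre
  unfold Spec_serpentine_deal_py serpentine_deal_py serpentine_deal_py_alt
  by_cases hnt : 0 < nt
  · rw [if_neg (by omega : ¬ nt ≤ 0)]
    by_cases hppt : 0 < ppt
    · obtain ⟨n, rfl⟩ : ∃ n : Nat, nt = (n : Int) :=
        ⟨nt.toNat, (Int.toNat_of_nonneg (le_of_lt hnt)).symm⟩
      obtain ⟨k, rfl⟩ : ∃ k : Nat, ppt = (k : Int) :=
        ⟨ppt.toNat, (Int.toNat_of_nonneg (le_of_lt hppt)).symm⟩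
      have hn : 0 < n := by exact_mod_cast hnt
      apply pvFolds_eq players n k hn
      simp [PySem.List.length_pyRange_one]
    · have h1 : nt * ppt ≤ 0 := by nlinarith
      rw [PySem.List.pyRange_one_eq_nil h1,
          PySem.List.pyRange_one_eq_nil (by omega : ppt ≤ 0)]
      simp only [List.foldl_nil]
  · have hnt' : nt ≤ 0 := by omega
    have hprod : nt * ppt ≤ 0 := by
      rcases hpre with h | ⟨h, _⟩
      · exact h
      · omega
    rw [if_pos hnt', PySem.List.pyRange_one_eq_nil hprod]
    simp only [List.foldl_nil]
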